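-- pv_equiv track=rewrite | github.com/awcook97/SEO-SWARM | scripts/inputs_from_schema.py | social_lines
-- ===== SOURCE A (Python) =====
-- SOCIAL_KEYS = {
--     "facebook": "Facebook",
--     "instagram": "Instagram",
--     "linkedin": "LinkedIn",
--     "twitter": "X",
--     "x.com": "X",
--     "youtube": "YouTube",
--     "tiktok": "TikTok",
-- }
--
-- def social_lines(same_as: list[str]) -> list[str]:
--     lines: list[str] = []
--     remaining = list(same_as)
--     for key, label in SOCIAL_KEYS.items():
--         for url in list(remaining):
--             if key in url:
--                 lines.append(f"  - {label}: {url}")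
--                 remaining.remove(url)
--                 break
--     for url in remaining:
--         lines.append(f"  - Other: {url}")
--     return lines
-- ===== SOURCE B (Python) =====
-- SOCIAL_KEYS = {
--     "facebook": "Facebook",
--     "instagram": "Instagram",
--     "linkedin": "LinkedIn",
--     "twitter": "X",
--     "x.com": "X",
--     "youtube": "YouTube",
--     "tiktok": "TikTok",
-- }
--
-- def social_lines(same_as: list[str]) -> list[str]:
--     matched: dict[str, str] = {}
--     others: list[str] = []
--     for url in same_as:
--         for key in SOCIAL_KEYS:
--             if key not in matched and key in url:
--                 matched[key] = url
--                 break
--         else: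
--             others.append(url)
--     lines = [f"  - {label}: {matched[key]}"
--              for key, label in SOCIAL_KEYS.items() if key in matched]
--     lines.extend(f"  - Other: {url}" for url in others)
--     return lines
-- ===== Notes on version B (the rewrite author's own statement) =====
-- stated objective: idiomatic
-- what changed: A's key-major nested scan (for each platform key, rescan and mutate the remaining-urls list) is transposed into a single url-major pass that assigns each url to the first unclaimed matching key via a dict and a for/else, then emits matched lines in key order followed by the unmatched urls.
import Mathlib
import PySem

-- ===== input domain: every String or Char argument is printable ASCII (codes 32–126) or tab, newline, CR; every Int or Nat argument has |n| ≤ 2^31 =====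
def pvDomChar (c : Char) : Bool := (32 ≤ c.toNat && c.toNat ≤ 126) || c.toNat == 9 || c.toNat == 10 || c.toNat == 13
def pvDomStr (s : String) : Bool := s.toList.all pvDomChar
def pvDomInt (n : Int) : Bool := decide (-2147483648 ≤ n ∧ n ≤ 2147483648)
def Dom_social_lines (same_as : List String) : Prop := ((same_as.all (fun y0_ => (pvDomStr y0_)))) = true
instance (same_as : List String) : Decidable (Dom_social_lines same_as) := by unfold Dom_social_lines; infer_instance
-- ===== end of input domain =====

-- B transposes A's key-major nested scan into one url-major pass over the input (dict of claimed keys + others list), then emits in key order; same output, different decomposition.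

-- ===== PORT A =====
-- SOCIAL_KEYS.items() in insertion order
def socialKeys : List (String × String) :=
  [("facebook", "Facebook"), ("instagram", "Instagram"), ("linkedin", "LinkedIn"),
   ("twitter", "X"), ("x.com", "X"), ("youtube", "YouTube"), ("tiktok", "TikTok")]

-- inner 'for url in list(remaining): if key in url: append; remaining.remove(url); break'
-- (remaining.remove(url) cannot raise here since url was found in the scanned copy of remaining;
--  the .getD fallback is never taken)
def aScan (key label : String) : List String → List String → List String → List String × List String
  | [], lines, remaining => (lines, remaining)
  | url :: rest, lines, remaining =>
    if PySem.Str.isIn key url then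
      (lines ++ ["  - " ++ label ++ ": " ++ url], (PySem.List.remove? remaining url).getD remaining)
    else aScan key label rest lines remaining

def social_lines (same_as : List String) : List String :=
  let st := socialKeys.foldl (fun (st : List String × List String) kv => aScan kv.1 kv.2 st.2 st.1 st.2) ([], same_as)
  st.1 ++ st.2.map (fun url => "  - Other: " ++ url)

-- ===== PORT B =====
-- 'for key in SOCIAL_KEYS: if key not in matched and key in url: matched[key]=url; break / else: others.append(url)'
def bAssign (url : String) : List (String × String) → PySem.Dict String String → List String → PySem.Dict String String × List String
  | [], matched, others => (matched, others ++ [url])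
  | (key, _) :: rest, matched, others =>
    if !matched.contains key && PySem.Str.isIn key url then (matched.insert key url, others)
    else bAssign url rest matched others

-- '[f"  - {label}: {matched[key]}" for key, label in SOCIAL_KEYS.items() if key in matched]'
-- ('if key in matched' then 'matched[key]' ported as the one guarded lookup get?)
def bEmit (matched : PySem.Dict String String) : List String :=
  socialKeys.filterMap (fun kv => (matched.get? kv.1).map (fun u => "  - " ++ kv.2 ++ ": " ++ u))

def social_lines_alt (same_as : List String) : List String :=
  let st := same_as.foldl (fun (st : PySem.Dict String String × List String) url => bAssign url socialKeys st.1 st.2) (PySem.Dict.empty, [])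
  bEmit st.1 ++ st.2.map (fun url => "  - Other: " ++ url)

-- ===== PRECONDITION & SPEC =====
def Spec_social_lines (same_as : List String) (out : List String) : Prop := out = social_lines_alt same_as
instance (same_as : List String) (out : List String) : Decidable (Spec_social_lines same_as out) := by unfold Spec_social_lines; infer_instance

-- ===== CLAIM (what is proved, stated in full; the proofs are below) =====
def Claim_equal_social_lines : Prop := ∀ (same_as : List String), Dom_social_lines same_as → Spec_social_lines same_as (social_lines same_as)

-- ===== LEMMAS AND PROOFS =====

-- proof-side: first url containing key, together with the list with it removed
def extract (k : String) : List String → Option (String × List String)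
  | [] => none
  | u :: rest =>
    if PySem.Str.isIn k u then some (u, rest)
    else (extract k rest).map (fun p => (p.1, u :: p.2))

-- proof-side canonical form of A's key-major pass: per-key matched lines (key order) and leftovers
def rowRun : List (String × String) → List String → List String × List String
  | [], urls => ([], urls)
  | kv :: ks, urls =>
    match extract kv.1 urls with
    | none => rowRun ks urls
    | some (u, urls') =>
      let p := rowRun ks urls'
      (("  - " ++ kv.2 ++ ": " ++ u) :: p.1, p.2)

def emit (ks : List (String × String)) (m : PySem.Dict String String) : List String :=
  ks.filterMap (fun kv => (m.get? kv.1).map (fun u => "  - " ++ kv.2 ++ ": " ++ u))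

def colFold (ks : List (String × String)) (urls : List String) (st : PySem.Dict String String × List String) : PySem.Dict String String × List String :=
  urls.foldl (fun st url => bAssign url ks st.1 st.2) st

theorem extract_isIn {k u : String} {urls r : List String} (h : extract k urls = some (u, r)) :
    PySem.Str.isIn k u = true := by
  induction urls generalizing r with
  | nil => simp [extract] at h
  | cons x rest ih =>
    simp only [extract] at h
    by_cases hx : PySem.Str.isIn k x = true
    · rw [if_pos hx] at h
      simp only [Option.some.injEq, Prod.mk.injEq] at h
      exact h.1 ▸ hx
    · rw [if_neg hx] at h
      obtain ⟨⟨u', r'⟩, hp, he⟩ := Option.map_eq_some_iff.mp h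
      simp only [Prod.mk.injEq] at he
      obtain ⟨hu, hr⟩ := he
      subst hu
      exact ih hp

theorem extract_remove {k u : String} {urls r : List String} (h : extract k urls = some (u, r)) :
    PySem.List.remove? urls u = some r := by
  induction urls generalizing r with
  | nil => simp [extract] at h
  | cons x rest ih =>
    simp only [extract] at h
    by_cases hx : PySem.Str.isIn k x = true
    · rw [if_pos hx] at h
      simp only [Option.some.injEq, Prod.mk.injEq] at h
      obtain ⟨h1, h2⟩ := h
      subst h1; subst h2
      exact PySem.List.remove?_cons_self x rest
    · rw [if_neg hx] at h
      obtain ⟨⟨u', r'⟩, hp, he⟩ := Option.map_eq_some_iff.mp h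
      simp only [Prod.mk.injEq] at he
      obtain ⟨hu, hr⟩ := he
      have hiu : PySem.Str.isIn k u = true := hu ▸ extract_isIn hp
      have hne : x ≠ u := fun hxy => hx (hxy ▸ hiu)
      have hp' : extract k rest = some (u, r') := hu ▸ hp
      rw [PySem.List.remove?_cons_of_ne rest hne, ih hp', ← hr]
      simp

theorem extract_none {k : String} {urls : List String} (h : extract k urls = none) :
    ∀ u ∈ urls, PySem.Str.isIn k u = false := by
  induction urls with
  | nil => simp
  | cons x rest ih =>
    simp only [extract] at h
    by_cases hx : PySem.Str.isIn k x = true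
    · rw [if_pos hx] at h; cases h
    · rw [if_neg hx] at h
      intro u hu
      rcases List.mem_cons.mp hu with h1 | h2
      · rw [h1]; exact Bool.eq_false_iff.mpr hx
      · exact ih (by simpa using h) u h2

theorem extract_split {k u : String} {urls r : List String} (h : extract k urls = some (u, r)) :
    ∃ pre post, urls = pre ++ u :: post ∧ r = pre ++ post ∧ ∀ p ∈ pre, PySem.Str.isIn k p = false := by
  induction urls generalizing r with
  | nil => simp [extract] at h
  | cons x rest ih =>
    simp only [extract] at h
    by_cases hx : PySem.Str.isIn k x = true
    · rw [if_pos hx] at h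
      simp only [Option.some.injEq, Prod.mk.injEq] at h
      obtain ⟨h1, h2⟩ := h
      subst h1; subst h2
      exact ⟨[], rest, by simp, by simp, by simp⟩
    · rw [if_neg hx] at h
      obtain ⟨⟨u', r'⟩, hp, he⟩ := Option.map_eq_some_iff.mp h
      simp only [Prod.mk.injEq] at he
      obtain ⟨hu, hr⟩ := he
      have hp' : extract k rest = some (u, r') := hu ▸ hp
      obtain ⟨pre, post, h1, h2, h3⟩ := ih hp' 
      refine ⟨x :: pre, post, by simp [h1], by simp [← hr, h2], ?_⟩
      intro q hq
      rcases List.mem_cons.mp hq with h4 | h5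
      · rw [h4]; exact Bool.eq_false_iff.mpr hx
      · exact h3 q h5

theorem aScan_extract (k l : String) (scan : List String) (lines remaining : List String) :
    aScan k l scan lines remaining =
      match extract k scan with
      | none => (lines, remaining)
      | some (u, _) => (lines ++ ["  - " ++ l ++ ": " ++ u], (PySem.List.remove? remaining u).getD remaining) := by
  induction scan with
  | nil => simp [aScan, extract]
  | cons x rest ih =>
    simp only [aScan, extract]
    by_cases hx : PySem.Str.isIn k x = true
    · rw [if_pos hx, if_pos hx]
    · rw [if_neg hx, if_neg hx, ih]
      cases hrec : extract k rest with
      | none => simp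
      | some p => simp

theorem foldl_rowRun (ks : List (String × String)) (lines urls : List String) :
    ks.foldl (fun (st : List String × List String) kv => aScan kv.1 kv.2 st.2 st.1 st.2) (lines, urls) =
      (lines ++ (rowRun ks urls).1, (rowRun ks urls).2) := by
  induction ks generalizing lines urls with
  | nil => simp [rowRun]
  | cons kv ks ih =>
    simp only [List.foldl_cons]
    rw [aScan_extract]
    cases he : extract kv.1 urls with
    | none => simp only [rowRun, he]; exact ih lines urls
    | some p =>
      obtain ⟨u, r⟩ := p
      simp only [rowRun, he]
      rw [extract_remove he]
      simp only [Option.getD_some]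
      rw [ih]
      simp

theorem social_lines_eq_rowRun (same_as : List String) :
    social_lines same_as = (rowRun socialKeys same_as).1 ++ (rowRun socialKeys same_as).2.map (fun url => "  - Other: " ++ url) := by
  unfold social_lines
  rw [show (socialKeys.foldl (fun (st : List String × List String) kv => aScan kv.1 kv.2 st.2 st.1 st.2) ([], same_as)) = (([] : List String) ++ (rowRun socialKeys same_as).1, (rowRun socialKeys same_as).2) from foldl_rowRun socialKeys [] same_as]
  simp

-- B-side step lemmas
theorem bAssign_skip (url : String) (kv : String × String) (ks : List (String × String))
    (m : PySem.Dict String String) (o : List String)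
    (h : PySem.Str.isIn kv.1 url = false ∨ m.contains kv.1 = true) :
    bAssign url (kv :: ks) m o = bAssign url ks m o := by
  obtain ⟨key, lb⟩ := kv
  simp only at h
  rcases h with h | h
  · simp only [PySem.Str.isIn_eq] at h
    simp [bAssign, h]
  · simp [bAssign, h]

theorem bAssign_get?_fresh (url : String) (ks : List (String × String))
    (m : PySem.Dict String String) (o : List String) (k : String) (hk : k ∉ ks.map (·.1)) :
    (bAssign url ks m o).1.get? k = m.get? k := by
  induction ks with
  | nil => rfl
  | cons kv rest ih =>
    obtain ⟨key, lb⟩ := kv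
    simp only [List.map_cons, List.mem_cons, not_or] at hk
    simp only [bAssign]
    split_ifs with hc
    · exact PySem.Dict.get?_insert_of_ne m url hk.1
    · exact ih hk.2

theorem bAssign_contains_noSub (url : String) (ks : List (String × String))
    (m : PySem.Dict String String) (o : List String) (k : String) (h : PySem.Str.isIn k url = false) :
    (bAssign url ks m o).1.contains k = m.contains k := by
  induction ks with
  | nil => rfl
  | cons kv rest ih =>
    obtain ⟨key, lb⟩ := kv
    simp only [bAssign]
    split_ifs with hc
    · have hne : (k == key) = false := by
        rw [beq_eq_false_iff_ne]
        intro he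
        subst he
        simp only [Bool.and_eq_true] at hc
        simp only [PySem.Str.isIn_eq] at h
        simp [h] at hc
      rw [PySem.Dict.contains_insert]
      simp [hne]
    · exact ih

theorem bAssign_contains_mono (url : String) (ks : List (String × String))
    (m : PySem.Dict String String) (o : List String) (k : String) (h : m.contains k = true) :
    (bAssign url ks m o).1.contains k = true := by
  induction ks with
  | nil => exact h
  | cons kv rest ih =>
    obtain ⟨key, lb⟩ := kv
    simp only [bAssign]
    split_ifs with hc
    · rw [PySem.Dict.contains_insert]; simp [h]
    · exact ih

theorem bAssign_congr (url : String) (ks : List (String × String))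
    (m m' : PySem.Dict String String) (o : List String)
    (h : ∀ j ∈ ks.map (·.1), m.get? j = m'.get? j) :
    (bAssign url ks m o).2 = (bAssign url ks m' o).2 ∧
      ∀ j, m.get? j = m'.get? j → (bAssign url ks m o).1.get? j = (bAssign url ks m' o).1.get? j := by
  induction ks with
  | nil => exact ⟨rfl, fun j hj => hj⟩
  | cons kv rest ih =>
    obtain ⟨key, lb⟩ := kv
    have hkey : m.contains key = m'.contains key := by
      rw [PySem.Dict.contains_eq_isSome_get?, PySem.Dict.contains_eq_isSome_get?, h key (by simp)]
    simp only [bAssign, hkey]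
    split_ifs with hc
    · refine ⟨rfl, fun j hj => ?_⟩
      rw [PySem.Dict.get?_insert, PySem.Dict.get?_insert]
      split_ifs with hje
      · rfl
      · exact hj
    · exact ih (fun j hj => h j (by simp [hj]))

-- fold versions
theorem colFold_nil (urls : List String) (m : PySem.Dict String String) (o : List String) :
    colFold [] urls (m, o) = (m, o ++ urls) := by
  induction urls generalizing o with
  | nil => simp [colFold]
  | cons u rest ih =>
    simp only [colFold, List.foldl_cons, bAssign] at *
    rw [ih (o ++ [u])]
    simp

theorem colFold_cons (ks : List (String × String)) (u : String) (urls : List String)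
    (st : PySem.Dict String String × List String) :
    colFold ks (u :: urls) st = colFold ks urls (bAssign u ks st.1 st.2) := rfl

theorem colFold_append (ks : List (String × String)) (xs ys : List String)
    (st : PySem.Dict String String × List String) :
    colFold ks (xs ++ ys) st = colFold ks ys (colFold ks xs st) := List.foldl_append ..

theorem colFold_get?_fresh (ks : List (String × String)) (urls : List String)
    (m : PySem.Dict String String) (o : List String) (k : String) (hk : k ∉ ks.map (·.1)) :
    (colFold ks urls (m, o)).1.get? k = m.get? k := by
  induction urls generalizing m o with
  | nil => rfl
  | cons u rest ih =>
    rw [colFold_cons, ← Prod.mk.eta (p := bAssign u ks m o), ih]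
    exact bAssign_get?_fresh u ks m o k hk

theorem colFold_contains_noSub (ks : List (String × String)) (urls : List String)
    (m : PySem.Dict String String) (o : List String) (k : String)
    (h : ∀ u ∈ urls, PySem.Str.isIn k u = false) :
    (colFold ks urls (m, o)).1.contains k = m.contains k := by
  induction urls generalizing m o with
  | nil => rfl
  | cons u rest ih =>
    rw [colFold_cons, ← Prod.mk.eta (p := bAssign u ks m o),
      ih _ _ (fun v hv => h v (by simp [hv]))]
    exact bAssign_contains_noSub u ks m o k (h u (by simp))

theorem colFold_skip (kv : String × String) (ks : List (String × String)) (urls : List String)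
    (st : PySem.Dict String String × List String)
    (h : ∀ u ∈ urls, PySem.Str.isIn kv.1 u = false) :
    colFold (kv :: ks) urls st = colFold ks urls st := by
  induction urls generalizing st with
  | nil => rfl
  | cons u rest ih =>
    rw [colFold_cons, colFold_cons, bAssign_skip u kv ks st.1 st.2 (Or.inl (h u (by simp)))]
    exact ih _ (fun v hv => h v (by simp [hv]))

theorem colFold_skip_contains (kv : String × String) (ks : List (String × String)) (urls : List String)
    (m : PySem.Dict String String) (o : List String) (h : m.contains kv.1 = true) :
    colFold (kv :: ks) urls (m, o) = colFold ks urls (m, o) := by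
  induction urls generalizing m o with
  | nil => rfl
  | cons u rest ih =>
    rw [colFold_cons, colFold_cons, bAssign_skip u kv ks m o (Or.inr h),
      ← Prod.mk.eta (p := bAssign u ks m o)]
    exact ih _ _ (bAssign_contains_mono u ks m o kv.1 h)

theorem colFold_congr (ks : List (String × String)) (urls : List String)
    (m m' : PySem.Dict String String) (o : List String)
    (h : ∀ j ∈ ks.map (·.1), m.get? j = m'.get? j) :
    (colFold ks urls (m, o)).2 = (colFold ks urls (m', o)).2 ∧
      ∀ j, m.get? j = m'.get? j → (colFold ks urls (m, o)).1.get? j = (colFold ks urls (m', o)).1.get? j := by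
  induction urls generalizing m m' o with
  | nil => exact ⟨rfl, fun j hj => hj⟩
  | cons u rest ih =>
    obtain ⟨ho, hg⟩ := bAssign_congr u ks m m' o h
    rw [colFold_cons, colFold_cons, ← Prod.mk.eta (p := bAssign u ks m o),
      ← Prod.mk.eta (p := bAssign u ks m' o), ← ho]
    obtain ⟨i1, i2⟩ := ih (bAssign u ks m o).1 (bAssign u ks m' o).1 (bAssign u ks m o).2 (fun j hj => hg j (h j hj))
    exact ⟨i1, fun j hj => i2 j (hg j hj)⟩

theorem emit_congr (ks : List (String × String)) (m m' : PySem.Dict String String)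
    (h : ∀ j ∈ ks.map (·.1), m.get? j = m'.get? j) : emit ks m = emit ks m' := by
  induction ks with
  | nil => rfl
  | cons kv rest ih =>
    simp only [emit, List.filterMap_cons]
    rw [h kv.1 (by simp)]
    have hrest := ih (fun j hj => h j (by simp [hj]))
    simp only [emit] at hrest
    rw [hrest]

-- the crux: url-major greedy equals key-major greedy
theorem main_equiv (ks : List (String × String)) (hnd : (ks.map (·.1)).Nodup)
    (urls : List String) (m : PySem.Dict String String) (o : List String)
    (hm : ∀ kv ∈ ks, m.contains kv.1 = false) :
    emit ks (colFold ks urls (m, o)).1 = (rowRun ks urls).1 ∧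
      (colFold ks urls (m, o)).2 = o ++ (rowRun ks urls).2 := by
  induction ks generalizing urls m o with
  | nil =>
    rw [colFold_nil]
    exact ⟨rfl, rfl⟩
  | cons kv ks ih =>
    obtain ⟨k1, l1⟩ := kv
    simp only [List.map_cons, List.nodup_cons] at hnd
    obtain ⟨hk1, hnd'⟩ := hnd
    have hm1 : m.contains k1 = false := hm (k1, l1) (by simp)
    have hm' : ∀ kv' ∈ ks, m.contains kv'.1 = false := fun kv' h' => hm kv' (by simp [h'])
    cases he : extract k1 urls with
    | none =>
      have hall : ∀ u ∈ urls, PySem.Str.isIn k1 u = false := extract_none he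
      rw [colFold_skip (k1, l1) ks urls (m, o) hall]
      obtain ⟨e1, e2⟩ := ih hnd' urls m o hm'
      have hg0 : (colFold ks urls (m, o)).1.get? k1 = none := by
        rw [PySem.Dict.get?_eq_none_iff_contains, colFold_contains_noSub ks urls m o k1 hall]
        exact hm1
      constructor
      · simp only [rowRun, he, emit, List.filterMap_cons, hg0, Option.map_none]
        exact e1
      · simp only [rowRun, he]
        exact e2
    | some p =>
      obtain ⟨u, urls'⟩ := p
      have hsub : PySem.Str.isIn k1 u = true := extract_isIn he
      obtain ⟨pre, post, hsplit, hr, hpre⟩ := extract_split he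
      subst hsplit
      subst hr
      set P := colFold ks pre (m, o) with hP
      have hcP : P.1.contains k1 = false := by
        rw [hP, colFold_contains_noSub ks pre m o k1 hpre]
        exact hm1
      have h2 : bAssign u ((k1, l1) :: ks) P.1 P.2 = (P.1.insert k1 u, P.2) := by
        simp only [bAssign]
        rw [if_pos]
        simp only [PySem.Str.isIn_eq] at hsub
        simp [hcP, hsub]
      have hS : colFold ((k1, l1) :: ks) (pre ++ u :: post) (m, o)
          = colFold ks post (P.1.insert k1 u, P.2) := by
        rw [colFold_append, colFold_skip (k1, l1) ks pre (m, o) hpre, ← hP, colFold_cons, h2,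
          colFold_skip_contains (k1, l1) ks post _ _ (PySem.Dict.contains_insert_self P.1 k1 u)]
      have hagree : ∀ j ∈ ks.map (·.1), (P.1.insert k1 u).get? j = P.1.get? j := by
        intro j hj
        exact PySem.Dict.get?_insert_of_ne P.1 u (fun hjk => hk1 (hjk ▸ hj))
      obtain ⟨hc2, hcg⟩ := colFold_congr ks post (P.1.insert k1 u) P.1 P.2 hagree
      obtain ⟨e1, e2⟩ := ih hnd' (pre ++ post) m o hm'
      have hPP : colFold ks (pre ++ post) (m, o) = colFold ks post (P.1, P.2) := by
        rw [colFold_append, ← hP, Prod.mk.eta]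
      rw [hPP] at e1 e2
      have hk1get : (colFold ks post (P.1.insert k1 u, P.2)).1.get? k1 = some u := by
        rw [colFold_get?_fresh ks post _ _ k1 hk1]
        exact PySem.Dict.get?_insert_self P.1 k1 u
      rw [hS]
      constructor
      · simp only [rowRun, he, emit, List.filterMap_cons, hk1get, Option.map_some]
        congr 1
        have hemit : emit ks (colFold ks post (P.1.insert k1 u, P.2)).1
            = emit ks (colFold ks post (P.1, P.2)).1 :=
          emit_congr ks _ _ (fun j hj => hcg j (hagree j hj))
        simp only [emit] at hemit e1
        rw [hemit]
        exact e1
      · simp only [rowRun, he]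
        rw [hc2]
        exact e2

-- ===== VERDICT (by name: the statement is the Claim_ definition above) =====
theorem social_lines_spec : Claim_equal_social_lines := by
  intro same_as _
  unfold Spec_social_lines
  have hnd : (socialKeys.map (·.1)).Nodup := by decide
  have hm : ∀ kv ∈ socialKeys, (PySem.Dict.empty : PySem.Dict String String).contains kv.1 = false := by
    intro kv _; simp [PySem.Dict.contains_empty]
  have h := main_equiv socialKeys hnd same_as PySem.Dict.empty [] hm
  rw [social_lines_eq_rowRun]
  rw [show social_lines_alt same_as = bEmit (colFold socialKeys same_as (PySem.Dict.empty, [])).1 ++ (colFold socialKeys same_as (PySem.Dict.empty, [])).2.map (fun url => "  - Other: " ++ url) from rfl]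
  have hemit : bEmit (colFold socialKeys same_as (PySem.Dict.empty, [])).1 = emit socialKeys (colFold socialKeys same_as (PySem.Dict.empty, [])).1 := rfl
  rw [hemit, h.1, h.2]
  simp
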